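-- pv_equiv track=rewrite | github.com/julienLhermite/IAR-homework | utilities.py | get_possible_dirty_cells
-- ===== SOURCE A (Python) =====
-- import itertools
--
-- def get_possible_dirty_cells(grid_size, base_pos):
--     """
--     Etant donné une taille de grille et une position de la base dans la grille, retourne la liste de toutes les
--     combinaisons
--     de cellules salles possible
--     :param grid_size: un tuple (x,y) représentant la taille de la grille
--     :param base_pos: [x, y] la position de la base
--     :return:
--     """
--     possible_grid_list = [list(i) for i in itertools.product([0, 1], repeat=grid_size[0] * grid_size[1]) if
--                           list(i)[base_pos[0] + base_pos[1] * grid_size[0]] == 0]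
--
--     possible_dirty_cells = list()
--     for possible in possible_grid_list:
--         l = list()
--         for index, case in enumerate(possible):
--             if case == 1:
--                 l.append([index % grid_size[0], index // grid_size[0]])
--         possible_dirty_cells.append(l)
--
--     return possible_dirty_cells
-- ===== SOURCE B (Python) =====
-- def _decode(v, coords):
--     """Cells selected by the bits of v, most significant bit first."""
--     if not coords:
--         return []
--     head, rest = coords[0], coords[1:]
--     sel = _decode(v, rest)
--     if (v >> len(rest)) & 1:
--         sel = [head] + sel
--     return sel
--
--
-- def get_possible_dirty_cells(grid_size, base_pos):
--     w = grid_size[0]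
--     n = w * grid_size[1]
--     base_index = base_pos[0] + base_pos[1] * w
--     others = list(range(n))
--     others.pop(base_index)
--     coords = [[i % w, i // w] for i in others]
--     return [_decode(v, coords) for v in range(2 ** len(coords))]
-- ===== Notes on version B (the rewrite author's own statement) =====
-- stated objective: alternative
-- what changed: B never materialises the 2^n full 0/1 grids: it lists the non-base cell indices once and decodes each counter value's bits (MSB first) directly into the subset of dirty-cell coordinates, instead of building every grid, filtering on a clean base and re-scanning each grid with enumerate.
import Mathlib
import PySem

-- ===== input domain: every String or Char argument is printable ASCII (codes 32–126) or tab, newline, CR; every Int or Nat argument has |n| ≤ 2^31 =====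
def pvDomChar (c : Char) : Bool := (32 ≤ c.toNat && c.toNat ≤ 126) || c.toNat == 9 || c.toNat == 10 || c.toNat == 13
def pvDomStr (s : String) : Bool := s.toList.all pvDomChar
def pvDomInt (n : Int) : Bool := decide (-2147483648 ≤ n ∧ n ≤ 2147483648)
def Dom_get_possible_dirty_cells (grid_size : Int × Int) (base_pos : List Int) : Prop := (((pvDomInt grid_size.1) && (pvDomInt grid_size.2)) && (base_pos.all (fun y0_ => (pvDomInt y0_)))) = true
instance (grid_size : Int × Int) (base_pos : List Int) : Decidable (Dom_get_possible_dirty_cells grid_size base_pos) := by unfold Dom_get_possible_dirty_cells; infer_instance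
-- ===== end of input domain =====

-- B enumerates subsets of the non-base cell indices directly by decoding the bits of a counter,
-- instead of building every full 0/1 grid and filtering out those with a dirty base (objective: alternative decomposition).

-- ===== PORT A =====
-- itertools.product([0, 1], repeat=n), each tuple as a list (first coordinate varies slowest)
def pvProd01 : Nat → List (List Int)
  | 0 => [[]]
  | n + 1 => (pvProd01 n).map (fun t => 0 :: t) ++ (pvProd01 n).map (fun t => 1 :: t)

-- the inner 'for index, case in enumerate(possible): if case == 1: l.append([...])' loop
def pvOnes (grid_size : Int × Int) (g : List Int) : List (List Int) :=
  (PySem.List.enumerate g).foldl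
    (fun l p =>
      if p.2 == 1 then
        l ++ [[PySem.Int.mod p.1 grid_size.1, PySem.Int.floordiv p.1 grid_size.1]]
      else l) []

def get_possible_dirty_cells (grid_size : Int × Int) (base_pos : List Int) : List (List (List Int)) :=
  let base_index := PySem.List.pyGetD base_pos 0 0 + PySem.List.pyGetD base_pos 1 0 * grid_size.1
  let possible_grid_list :=
    (pvProd01 (grid_size.1 * grid_size.2).toNat).filter
      (fun g => PySem.List.pyGet? g base_index == some 0)
  possible_grid_list.foldl (fun acc possible => acc ++ [pvOnes grid_size possible]) []

-- ===== PORT B =====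
-- _decode(v, coords): cells selected by the bits of v, most significant bit first
def pvDecode (v : Nat) : List (List Int) → List (List Int)
  | [] => []
  | head :: rest =>
    let sel := pvDecode v rest
    if (v >>> rest.length) &&& 1 == 1 then head :: sel else sel

def get_possible_dirty_cells_alt (grid_size : Int × Int) (base_pos : List Int) : List (List (List Int)) :=
  let w := grid_size.1
  let n := w * grid_size.2
  let base_index := PySem.List.pyGetD base_pos 0 0 + PySem.List.pyGetD base_pos 1 0 * w
  -- others = list(range(n)); others.pop(base_index)   (pop raises IndexError outside Pre_, where [] stands in)
  let others := ((PySem.List.pop? (PySem.List.pyRange 0 n 1) base_index).map Prod.snd).getD []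
  let coords := others.map (fun i => [PySem.Int.mod i w, PySem.Int.floordiv i w])
  (List.range (2 ^ coords.length)).map (fun v => pvDecode v coords)

-- ===== PRECONDITION & SPEC =====
-- Pre_ is exactly where the Python A returns: base_pos has two coordinates and the flattened base
-- index is a valid Python index into the n = w*h cells (negative indices count from the end, as both
-- programs do).  Outside it A raises (IndexError, or ValueError for a negative cell count).
def Pre_get_possible_dirty_cells (grid_size : Int × Int) (base_pos : List Int) : Prop :=
  2 ≤ base_pos.length ∧
  -(grid_size.1 * grid_size.2) ≤ base_pos.getD 0 0 + base_pos.getD 1 0 * grid_size.1 ∧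
  base_pos.getD 0 0 + base_pos.getD 1 0 * grid_size.1 < grid_size.1 * grid_size.2

instance (grid_size : Int × Int) (base_pos : List Int) : Decidable (Pre_get_possible_dirty_cells grid_size base_pos) := by
  unfold Pre_get_possible_dirty_cells; infer_instance

def pvWitness_get_possible_dirty_cells : (Int × Int) × List Int := ((2, 2), [1, 0])

def Spec_get_possible_dirty_cells (grid_size : Int × Int) (base_pos : List Int) (out : List (List (List Int))) : Prop := out = get_possible_dirty_cells_alt grid_size base_pos
instance (grid_size : Int × Int) (base_pos : List Int) (out : List (List (List Int))) : Decidable (Spec_get_possible_dirty_cells grid_size base_pos out) := by unfold Spec_get_possible_dirty_cells; infer_instance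

-- ===== CLAIM (what is proved, stated in full; the proofs are below) =====
def Claim_equal_get_possible_dirty_cells : Prop := ∀ (grid_size : Int × Int) (base_pos : List Int), Dom_get_possible_dirty_cells grid_size base_pos → Pre_get_possible_dirty_cells grid_size base_pos → Spec_get_possible_dirty_cells grid_size base_pos (get_possible_dirty_cells grid_size base_pos)

-- ===== LEMMAS AND PROOFS =====

-- subsets of a list of cells, in binary-counting order (first cell = most significant bit)
def pvSubsets {α : Type} : List α → List (List α)
  | [] => [[]]
  | c :: rest => pvSubsets rest ++ (pvSubsets rest).map (fun s => c :: s)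

-- [s, s+1, …, s+n-1]
def pvAll (s : Int) : Nat → List Int
  | 0 => []
  | n + 1 => s :: pvAll (s + 1) n

-- [s, …, s+n-1] without s+b
def pvOthers (s : Int) : Nat → Nat → List Int
  | 0, _ => []
  | n + 1, 0 => pvAll (s + 1) n
  | n + 1, b + 1 => s :: pvOthers (s + 1) n b

-- indices (starting at s) of the cells equal to 1
def pvIdxOnes : List Int → Int → List Int
  | [], _ => []
  | c :: rest, s => (if c == 1 then [s] else []) ++ pvIdxOnes rest (s + 1)

theorem pvSubsets_map {α β : Type} (f : α → β) (l : List α) :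
    pvSubsets (l.map f) = (pvSubsets l).map (List.map f) := by
  induction l with
  | nil => rfl
  | cons c rest ih => simp [pvSubsets, ih, Function.comp]

theorem pvDecode_high (k : Nat) (u : Nat) (_hu : u < 2 ^ k) :
    ∀ (coords : List (List Int)), coords.length ≤ k →
      pvDecode (2 ^ k + u) coords = pvDecode u coords := by
  intro coords
  induction coords with
  | nil => intro _; rfl
  | cons c rest ih =>
    intro hlen
    simp only [List.length_cons] at hlen
    have hrest : rest.length ≤ k := by omega
    have hbit : ((2 ^ k + u) >>> rest.length) &&& 1 = (u >>> rest.length) &&& 1 := by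
      have hk : rest.length + (k - rest.length) = k := by omega
      have hd : 2 ^ k + u = 2 ^ rest.length * 2 ^ (k - rest.length) + u := by
        rw [← pow_add, hk]
      rw [Nat.shiftRight_eq_div_pow, Nat.shiftRight_eq_div_pow, hd,
        Nat.mul_add_div (Nat.two_pow_pos _), Nat.and_one_is_mod, Nat.and_one_is_mod]
      have he : 2 ^ (k - rest.length) = 2 * 2 ^ (k - rest.length - 1) := by
        rw [← pow_succ']; congr 1; omega
      omega
    simp [pvDecode, hbit, ih hrest]

theorem pvDecode_range (coords : List (List Int)) :
    (List.range (2 ^ coords.length)).map (fun v => pvDecode v coords) = pvSubsets coords := by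
  induction coords with
  | nil => rfl
  | cons c rest ih =>
    have h2 : 2 ^ (c :: rest).length = 2 ^ rest.length + 2 ^ rest.length := by
      simp [List.length_cons, pow_succ]; ring
    rw [h2, List.range_add, List.map_append, List.map_map]
    have hlow : (List.range (2 ^ rest.length)).map (fun v => pvDecode v (c :: rest))
        = pvSubsets rest := by
      rw [← ih]
      apply List.map_congr_left
      intro v hv
      rw [List.mem_range] at hv
      have hz : v >>> rest.length = 0 := by
        rw [Nat.shiftRight_eq_div_pow]; exact Nat.div_eq_of_lt hv
      simp [pvDecode, hz]
    have hhigh : (List.range (2 ^ rest.length)).map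
        ((fun v => pvDecode v (c :: rest)) ∘ (fun x => 2 ^ rest.length + x))
        = (pvSubsets rest).map (fun s => c :: s) := by
      rw [← ih, List.map_map]
      apply List.map_congr_left
      intro u hu
      rw [List.mem_range] at hu
      have hone : ((2 ^ rest.length + u) >>> rest.length) &&& 1 = 1 := by
        have hd : 2 ^ rest.length + u = 2 ^ rest.length * 1 + u := by ring
        rw [Nat.shiftRight_eq_div_pow, hd, Nat.mul_add_div (Nat.two_pow_pos _),
          Nat.div_eq_of_lt hu]
        decide
      simp [Function.comp, pvDecode, hone, pvDecode_high rest.length u hu rest le_rfl]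
    rw [hlow, hhigh]; rfl

theorem pvOnes_eq (grid_size : Int × Int) (g : List Int) :
    pvOnes grid_size g =
      (pvIdxOnes g 0).map (fun i => [PySem.Int.mod i grid_size.1, PySem.Int.floordiv i grid_size.1]) := by
  have key : ∀ (g : List Int) (s : Int) (acc : List (List Int)),
      (PySem.List.enumerate g s).foldl
        (fun l p =>
          if p.2 == 1 then
            l ++ [[PySem.Int.mod p.1 grid_size.1, PySem.Int.floordiv p.1 grid_size.1]]
          else l) acc
      = acc ++ (pvIdxOnes g s).map (fun i => [PySem.Int.mod i grid_size.1, PySem.Int.floordiv i grid_size.1]) := by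
    intro g
    induction g with
    | nil => intro s acc; simp [PySem.List.enumerate_nil, pvIdxOnes]
    | cons x xs ih =>
      intro s acc
      rw [PySem.List.enumerate_cons, List.foldl_cons, ih]
      by_cases hx : x == 1 <;> simp [pvIdxOnes, hx]
  simpa [pvOnes] using key g 0 []

theorem pvIdxOnes_zero_cons (g : List Int) (s : Int) :
    pvIdxOnes (0 :: g) s = pvIdxOnes g (s + 1) := by
  simp [pvIdxOnes]

theorem pvIdxOnes_one_cons (g : List Int) (s : Int) :
    pvIdxOnes (1 :: g) s = s :: pvIdxOnes g (s + 1) := by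
  simp [pvIdxOnes]

theorem pvAll_map (n : Nat) : ∀ (s : Int),
    (pvProd01 n).map (fun g => pvIdxOnes g s) = pvSubsets (pvAll s n) := by
  induction n with
  | zero => intro s; rfl
  | succ m ih =>
    intro s
    rw [pvProd01, List.map_append, List.map_map, List.map_map]
    have h0 : ((fun g => pvIdxOnes g s) ∘ (fun t => (0 : Int) :: t))
        = fun g => pvIdxOnes g (s + 1) := by
      funext g; simp [Function.comp, pvIdxOnes_zero_cons]
    have h1 : ((fun g => pvIdxOnes g s) ∘ (fun t => (1 : Int) :: t))
        = fun g => s :: pvIdxOnes g (s + 1) := by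
      funext g; simp [Function.comp, pvIdxOnes_one_cons]
    rw [h0, h1, ih (s + 1)]
    have h2 : (pvProd01 m).map (fun g => s :: pvIdxOnes g (s + 1))
        = ((pvProd01 m).map (fun g => pvIdxOnes g (s + 1))).map (fun l => s :: l) := by
      rw [List.map_map]; rfl
    rw [h2, ih (s + 1)]
    rfl

theorem pvMain (n : Nat) : ∀ (b : Nat), b < n → ∀ (s : Int),
    ((pvProd01 n).filter (fun g => PySem.List.pyGet? g (b : Int) == some 0)).map
        (fun g => pvIdxOnes g s) = pvSubsets (pvOthers s n b) := by
  induction n with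
  | zero => intro b hb; omega
  | succ m ih =>
    intro b hb s
    rw [pvProd01, List.filter_append, List.filter_map, List.filter_map]
    cases b with
    | zero =>
      have hp0 : ((fun g => PySem.List.pyGet? g ((0 : Nat) : Int) == some 0) ∘
          (fun t => (0 : Int) :: t)) = fun _ => true := by
        funext g; simp [Function.comp]
      have hp1 : ((fun g => PySem.List.pyGet? g ((0 : Nat) : Int) == some 0) ∘
          (fun t => (1 : Int) :: t)) = fun _ => false := by
        funext g; simp [Function.comp]
      rw [hp0, hp1, List.filter_true, List.filter_false]
      simp only [List.map_nil, List.map_map, List.append_nil]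
      have h0 : ((fun g => pvIdxOnes g s) ∘ (fun t => (0 : Int) :: t))
          = fun g => pvIdxOnes g (s + 1) := by
        funext g; simp [Function.comp, pvIdxOnes_zero_cons]
      rw [h0, pvAll_map m (s + 1)]
      rfl
    | succ b' =>
      have hb' : b' < m := by omega
      have hcast : ((b' + 1 : Nat) : Int) = ((b' : Nat) : Int) + 1 := by push_cast; ring
      have hp : ∀ (x : Int), ((fun g => PySem.List.pyGet? g ((b' + 1 : Nat) : Int) == some 0) ∘
          (fun t => x :: t)) = fun g => PySem.List.pyGet? g ((b' : Nat) : Int) == some 0 := by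
        intro x; funext g
        simp [Function.comp, hcast, PySem.List.pyGet?_cons_succ]
      rw [hp 0, hp 1]
      simp only [List.map_append, List.map_map]
      have h0 : ((fun g => pvIdxOnes g s) ∘ (fun t => (0 : Int) :: t))
          = fun g => pvIdxOnes g (s + 1) := by
        funext g; simp [Function.comp, pvIdxOnes_zero_cons]
      have h1 : ((fun g => pvIdxOnes g s) ∘ (fun t => (1 : Int) :: t))
          = fun g => s :: pvIdxOnes g (s + 1) := by
        funext g; simp [Function.comp, pvIdxOnes_one_cons]
      rw [h0, h1]
      have h2 : ((pvProd01 m).filter (fun g => PySem.List.pyGet? g ((b' : Nat) : Int) == some 0)).map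
            (fun g => s :: pvIdxOnes g (s + 1))
          = (((pvProd01 m).filter (fun g => PySem.List.pyGet? g ((b' : Nat) : Int) == some 0)).map
            (fun g => pvIdxOnes g (s + 1))).map (fun l => s :: l) := by
        rw [List.map_map]; rfl
      rw [h2, ih b' hb' (s + 1)]
      rfl

theorem pvRangeAll (n : Nat) : ∀ (s : Int), PySem.List.pyRange s (s + n) 1 = pvAll s n := by
  induction n with
  | zero => intro s; simp [PySem.List.pyRange_one_eq_nil, pvAll]
  | succ m ih =>
    intro s
    rw [PySem.List.pyRange_one_cons (by push_cast; omega)]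
    have h : s + ((m + 1 : Nat) : Int) = (s + 1) + (m : Int) := by push_cast; ring
    rw [pvAll, h, ih (s + 1)]

theorem pvProd01_length (n : Nat) : ∀ g ∈ pvProd01 n, g.length = n := by
  induction n with
  | zero => intro g hg; simp [pvProd01] at hg; simp [hg]
  | succ m ih =>
    intro g hg
    simp only [pvProd01, List.mem_append, List.mem_map] at hg
    rcases hg with ⟨t, ht, rfl⟩ | ⟨t, ht, rfl⟩ <;> simp [ih t ht]

theorem pvAll_eraseIdx (n : Nat) : ∀ (b : Nat), b < n → ∀ (s : Int),
    (pvAll s n).eraseIdx b = pvOthers s n b := by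
  induction n with
  | zero => intro b hb; omega
  | succ m ih =>
    intro b hb s
    cases b with
    | zero => simp [pvAll, pvOthers]
    | succ b' =>
      have hb' : b' < m := by omega
      rw [pvAll, List.eraseIdx_cons_succ, ih b' hb' (s + 1)]
      rfl

-- the normalised (wrapped) index Python uses for xs[i] and xs.pop(i)
theorem pvGetNorm {α : Type} (xs : List α) (i : Int) (k : Nat)
    (h0 : -(xs.length : Int) ≤ i) (h1 : i < xs.length)
    (hk : (k : Int) = if i < 0 then (xs.length : Int) + i else i) :
    PySem.List.pyGet? xs i = xs[k]? := by
  rcases lt_or_ge i 0 with hneg | hpos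
  · rw [if_pos hneg] at hk
    have hkeq : xs.length - (-i).toNat = k := by omega
    simp only [PySem.List.pyGet?, PySem.List.pyIdx?, if_neg (by omega : ¬ (0:Int) ≤ i),
      if_pos h0, Option.bind, hkeq]
  · rw [if_neg (by omega : ¬ i < 0)] at hk
    have hkeq : i.toNat = k := by omega
    simp only [PySem.List.pyGet?, PySem.List.pyIdx?, if_pos hpos, if_pos h1,
      Option.bind, hkeq]

theorem pvPopNorm {α : Type} (xs : List α) (i : Int) (k : Nat)
    (h0 : -(xs.length : Int) ≤ i) (h1 : i < xs.length)
    (hk : (k : Int) = if i < 0 then (xs.length : Int) + i else i) :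
    (PySem.List.pop? xs i).map Prod.snd = some (xs.eraseIdx k) := by
  have hklen : k < xs.length := by split_ifs at hk <;> omega
  have hget : xs[k]? = some xs[k] := List.getElem?_eq_getElem hklen
  rcases lt_or_ge i 0 with hneg | hpos
  · have hkeq : xs.length - (-i).toNat = k := by rw [if_pos hneg] at hk; omega
    simp only [PySem.List.pop?, PySem.List.pyIdx?, if_neg (by omega : ¬ (0:Int) ≤ i),
      if_pos h0, Option.bind, hkeq, hget, Option.map_some]
  · have hkeq : i.toNat = k := by rw [if_neg (by omega : ¬ i < 0)] at hk; omega
    simp only [PySem.List.pop?, PySem.List.pyIdx?, if_pos hpos, if_pos h1,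
      Option.bind, hkeq, hget, Option.map_some]

-- ===== VERDICT (by name: the statement is the Claim_ definition above) =====
theorem get_possible_dirty_cells_spec : Claim_equal_get_possible_dirty_cells := by
  intro gs bp _hdom hpre
  unfold Spec_get_possible_dirty_cells
  obtain ⟨hlen, hbl, hbu⟩ := hpre
  have hg0 : PySem.List.pyGetD bp 0 0 = bp.getD 0 0 := by
    rw [show (0 : Int) = ((0 : Nat) : Int) by norm_num, PySem.List.pyGetD_natCast]
  have hg1 : PySem.List.pyGetD bp 1 0 = bp.getD 1 0 := by
    rw [show (1 : Int) = ((1 : Nat) : Int) by norm_num, PySem.List.pyGetD_natCast]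
  set bI : Int := bp.getD 0 0 + bp.getD 1 0 * gs.1 with hbI
  set nI : Int := gs.1 * gs.2 with hnI
  have hn0 : 0 < nI := by omega
  have hnnat : nI = ((nI.toNat : Nat) : Int) := (Int.toNat_of_nonneg (le_of_lt hn0)).symm
  set tN : Nat := (if bI < 0 then nI + bI else bI).toNat with htN
  have ht : ((tN : Nat) : Int) = if bI < 0 then nI + bI else bI := by
    rw [htN, Int.toNat_of_nonneg (by split_ifs <;> omega)]
  have hblt : tN < nI.toNat := by split_ifs at ht <;> omega
  -- A side
  have hA : get_possible_dirty_cells gs bp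
      = (pvSubsets (pvOthers 0 nI.toNat tN)).map
          (List.map (fun i => [PySem.Int.mod i gs.1, PySem.Int.floordiv i gs.1])) := by
    show ((pvProd01 nI.toNat).filter
        (fun g => PySem.List.pyGet? g (PySem.List.pyGetD bp 0 0 + PySem.List.pyGetD bp 1 0 * gs.1) == some 0)).foldl
        (fun acc possible => acc ++ [pvOnes gs possible]) [] = _
    rw [PySem.List.foldl_append_singleton_eq_map]
    rw [List.nil_append]
    have hfilter : (pvProd01 nI.toNat).filter
          (fun g => PySem.List.pyGet? g (PySem.List.pyGetD bp 0 0 + PySem.List.pyGetD bp 1 0 * gs.1) == some 0)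
        = (pvProd01 nI.toNat).filter
          (fun g => PySem.List.pyGet? g ((tN : Nat) : Int) == some (0 : Int)) := by
      apply List.filter_congr
      intro g hg
      have hglen : g.length = nI.toNat := pvProd01_length nI.toNat g hg
      have e1 : PySem.List.pyGet? g (PySem.List.pyGetD bp 0 0 + PySem.List.pyGetD bp 1 0 * gs.1)
          = g[tN]? := by
        rw [hg0, hg1, ← hbI]
        exact pvGetNorm g bI tN (by rw [hglen]; omega) (by rw [hglen]; omega)
          (by rw [ht, hglen]; split_ifs <;> omega)
      have e2 : PySem.List.pyGet? g ((tN : Nat) : Int) = g[tN]? := PySem.List.pyGet?_natCast g tN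
      rw [e1, e2]
    rw [hfilter]
    have hones : ((pvProd01 nI.toNat).filter
          (fun g => PySem.List.pyGet? g ((tN : Nat) : Int) == some (0 : Int))).map (pvOnes gs)
        = (((pvProd01 nI.toNat).filter
          (fun g => PySem.List.pyGet? g ((tN : Nat) : Int) == some (0 : Int))).map
            (fun g => pvIdxOnes g 0)).map
          (List.map (fun i => [PySem.Int.mod i gs.1, PySem.Int.floordiv i gs.1])) := by
      rw [List.map_map]
      apply List.map_congr_left
      intro g _
      exact pvOnes_eq gs g
    rw [hones, pvMain nI.toNat tN hblt 0]
  -- B side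
  have hB : get_possible_dirty_cells_alt gs bp
      = (pvSubsets (pvOthers 0 nI.toNat tN)).map
          (List.map (fun i => [PySem.Int.mod i gs.1, PySem.Int.floordiv i gs.1])) := by
    show (List.range (2 ^ ((((PySem.List.pop? (PySem.List.pyRange 0 nI 1)
          (PySem.List.pyGetD bp 0 0 + PySem.List.pyGetD bp 1 0 * gs.1)).map Prod.snd).getD []).map
          (fun i => [PySem.Int.mod i gs.1, PySem.Int.floordiv i gs.1])).length)).map
        (fun v => pvDecode v ((((PySem.List.pop? (PySem.List.pyRange 0 nI 1)
          (PySem.List.pyGetD bp 0 0 + PySem.List.pyGetD bp 1 0 * gs.1)).map Prod.snd).getD []).map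
          (fun i => [PySem.Int.mod i gs.1, PySem.Int.floordiv i gs.1]))) = _
    rw [pvDecode_range]
    have hrange : PySem.List.pyRange 0 nI 1 = pvAll 0 nI.toNat := by
      have := pvRangeAll nI.toNat 0
      rw [zero_add] at this
      rw [hnnat, this]
      congr 1
    have hrlen : (PySem.List.pyRange 0 nI 1).length = nI.toNat := by
      rw [PySem.List.length_pyRange_one]; omega
    have hpop : ((PySem.List.pop? (PySem.List.pyRange 0 nI 1)
          (PySem.List.pyGetD bp 0 0 + PySem.List.pyGetD bp 1 0 * gs.1)).map Prod.snd).getD []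
        = pvOthers 0 nI.toNat tN := by
      rw [hg0, hg1, ← hbI,
        pvPopNorm (PySem.List.pyRange 0 nI 1) bI tN (by rw [hrlen]; omega) (by rw [hrlen]; omega)
          (by rw [ht, hrlen]; split_ifs <;> omega),
        Option.getD_some, hrange, pvAll_eraseIdx nI.toNat tN hblt 0]
    rw [hpop, pvSubsets_map]
  rw [hA, hB]
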